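-- pv_equiv track=rewrite | github.com/lumiere0123/practice_C | PYTHON_CSC108/git/Exercises/141026_131303/dictionaries.py | build_placements
-- ===== SOURCE A (Python) =====
-- def build_placements(shoes):
--     """ (list of str) -> dict of {str: list of int}
--
--     Return a dictionary where each key is a company and each value is a
--     list of placements by people wearing shoes made by that company.
--
--     >>> build_placements(['Saucony', 'Asics', 'Asics', 'NB', 'Saucony', \
--                           'Nike', 'Asics', 'Adidas', 'Saucony', 'Asics'])
--     {'Saucony': [1, 5, 9], 'Asics': [2, 3, 7, 10], 'NB': [4], 'Nike': [6], 'Adidas': [8]}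
--     """
--
--     #pick dictionary names indicative of the keys to values pairs.
--     company_to_placements = {}
--
--     for position in range(len(shoes)):
--         company = shoes[position]
--         if company in company_to_placements:
--             company_to_placements[company].append(position + 1)
--         else:
--             company_to_placements[company] = [position + 1]
--     return company_to_placements
-- ===== SOURCE B (Python) =====
-- def build_placements(shoes):
--     companies = list(dict.fromkeys(shoes))
--     return {company: [i + 1 for i, s in enumerate(shoes) if s == company]
--             for company in companies}
-- ===== Notes on version B (the rewrite author's own statement) =====
-- stated objective: alternative
-- what changed: Replaces the single accumulating dict pass with a key-extraction step (dict.fromkeys for first-occurrence order) followed by one enumerate-scan per distinct company in a dict comprehension.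
import Mathlib
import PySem

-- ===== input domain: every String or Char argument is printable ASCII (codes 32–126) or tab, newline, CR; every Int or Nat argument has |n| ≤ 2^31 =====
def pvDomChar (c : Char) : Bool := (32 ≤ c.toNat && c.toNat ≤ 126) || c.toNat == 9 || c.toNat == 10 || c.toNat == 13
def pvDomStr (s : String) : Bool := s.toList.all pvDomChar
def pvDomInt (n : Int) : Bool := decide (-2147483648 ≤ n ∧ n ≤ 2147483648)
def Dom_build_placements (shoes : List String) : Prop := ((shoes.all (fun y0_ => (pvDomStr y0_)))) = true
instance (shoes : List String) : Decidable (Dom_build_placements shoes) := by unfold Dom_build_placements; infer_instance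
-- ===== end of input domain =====

-- B replaces A's single accumulating dict pass by key extraction (dedup = dict.fromkeys)
-- followed by one enumerate-scan per distinct company (alternative decomposition, not faster).

-- ===== PORT A =====
def build_placements (shoes : List String) : List (String × List Int) :=
  let company_to_placements :=
    (PySem.List.pyRange 0 (shoes.length : Int) 1).foldl
      (fun d position =>
        let company := PySem.List.pyGetD shoes position ""
        if d.contains company then
          d.insert company (d.getD company [] ++ [position + 1])
        else
          d.insert company [position + 1])
      PySem.Dict.empty
  company_to_placements.items

-- ===== PORT B =====
def build_placements_alt (shoes : List String) : List (String × List Int) :=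
  let companies := PySem.List.dedup shoes
  companies.map (fun company =>
    (company,
      ((PySem.List.enumerate shoes 0).filter (fun p => p.2 == company)).map
        (fun p => p.1 + 1)))

-- ===== PRECONDITION & SPEC =====
def Spec_build_placements (shoes : List String) (out : List (String × List Int)) : Prop := out = build_placements_alt shoes
instance (shoes : List String) (out : List (String × List Int)) : Decidable (Spec_build_placements shoes out) := by unfold Spec_build_placements; infer_instance

-- ===== CLAIM (what is proved, stated in full; the proofs are below) =====
def Claim_equal_build_placements : Prop := ∀ (shoes : List String), Dom_build_placements shoes → Spec_build_placements shoes (build_placements shoes)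

-- ===== LEMMAS AND PROOFS =====

-- The index range paired with the indexed values is exactly enumerate.
theorem pyRange_pair_pyGetD_eq_enumerate {α : Type} (dflt : α) :
    ∀ (xs pre : List α),
      (PySem.List.pyRange (pre.length : Int) ((pre.length : Int) + xs.length) 1).map
          (fun j => (j, PySem.List.pyGetD (pre ++ xs) j dflt))
        = PySem.List.enumerate xs (pre.length : Int) := by
  intro xs
  induction xs with
  | nil => intro pre; simp [PySem.List.pyRange_one_eq_nil, PySem.List.enumerate_nil]
  | cons x xs ih =>
    intro pre
    rw [PySem.List.pyRange_one_cons (by simp)]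
    rw [List.map_cons, PySem.List.enumerate_cons]
    have hhead : PySem.List.pyGetD (pre ++ x :: xs) (pre.length : Int) dflt = x := by
      rw [PySem.List.pyGetD_natCast]; simp
    have htail := ih (pre ++ [x])
    simp only [List.length_append, List.length_cons, List.length_nil, List.append_assoc,
      List.singleton_append, Nat.cast_add, Nat.cast_one, zero_add] at htail
    rw [hhead]
    simp only [List.length_cons, Nat.cast_add, Nat.cast_one]
    rw [show (pre.length : Int) + (xs.length + 1) = pre.length + 1 + xs.length by ring]
    rw [htail]

-- A's loop body, for any dict state, is exactly Dict.modify with default [].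
theorem body_eq_modify (d : PySem.Dict String (List Int)) (c : String) (v : Int) :
    (if d.contains c then d.insert c (d.getD c [] ++ [v]) else d.insert c [v])
      = d.modify c [] (· ++ [v]) := by
  simp only [PySem.Dict.modify]
  split_ifs with h
  · rfl
  · rw [PySem.Dict.getD_of_not_contains d [] (by simpa using h)]
    simp

theorem build_placements_eq_alt (shoes : List String) :
    build_placements shoes = build_placements_alt shoes := by
  unfold build_placements build_placements_alt
  have h0 : (PySem.List.pyRange 0 (shoes.length : Int) 1).map
      (fun j => (j, PySem.List.pyGetD shoes j "")) = PySem.List.enumerate shoes 0 := by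
    simpa using pyRange_pair_pyGetD_eq_enumerate "" shoes []
  -- step 1: index loop → enumerate loop with a Dict.modify body
  have h1 : (PySem.List.pyRange 0 (shoes.length : Int) 1).foldl
      (fun d position =>
        let company := PySem.List.pyGetD shoes position ""
        if d.contains company then d.insert company (d.getD company [] ++ [position + 1])
        else d.insert company [position + 1]) PySem.Dict.empty
      = (PySem.List.enumerate shoes 0).foldl
          (fun d p => d.modify p.2 [] (· ++ [p.1 + 1])) PySem.Dict.empty := by
    rw [← h0, List.foldl_map]
    congr 1
    funext d p
    exact body_eq_modify d (PySem.List.pyGetD shoes p "") (p + 1)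
  rw [h1]
  -- step 2: view it as a modify loop over (company, placement) pairs
  have h2 : (PySem.List.enumerate shoes 0).foldl
      (fun d p => d.modify p.2 [] (· ++ [p.1 + 1])) PySem.Dict.empty
      = ((PySem.List.enumerate shoes 0).map (fun p => (p.2, p.1 + 1))).foldl
          (fun d q => d.modify q.1 [] (· ++ [q.2])) PySem.Dict.empty := by
    rw [List.foldl_map]
  rw [h2]
  set l := (PySem.List.enumerate shoes 0).map (fun p => (p.2, p.1 + 1)) with hl
  set D := l.foldl (fun d q => d.modify q.1 [] (· ++ [q.2])) PySem.Dict.empty with hD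
  have hnd : D.keys.Nodup := by
    rw [hD]
    exact PySem.Dict.nodup_keys_foldl_modify_key l Prod.fst [] (fun d q => (· ++ [q.2])) _ (by simp)
  -- step 3: the keys are the distinct companies in first-occurrence order
  have hkeys : D.keys = PySem.List.dedup shoes := by
    rw [hD]
    rw [PySem.Dict.keys_foldl_modify_key (l := l) (key := Prod.fst) (d0 := ([] : List Int))
      (f := fun d q => (· ++ [q.2])) (d := PySem.Dict.empty)]
    have hmap : l.map Prod.fst = shoes := by
      rw [hl, List.map_map]
      exact PySem.List.map_snd_enumerate shoes 0
    rw [hmap]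
    rfl
  -- step 4: each key's value is the filtered placement list
  have hget : ∀ c, D.getD c []
      = ((PySem.List.enumerate shoes 0).filter (fun p => p.2 == c)).map (fun p => p.1 + 1) := by
    intro c
    rw [hD, PySem.Dict.getD_foldl_modify_append]
    rw [hl, List.filter_map, List.map_map]
    rfl
  rw [PySem.Dict.items_eq_map_keys D hnd []]
  rw [hkeys]
  apply List.map_congr_left
  intro c hc
  rw [hget c]

-- ===== VERDICT (by name: the statement is the Claim_ definition above) =====
theorem build_placements_spec : Claim_equal_build_placements := by
  intro shoes _
  unfold Spec_build_placements
  exact build_placements_eq_alt shoes
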